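-- pv_equiv track=rewrite | github.com/MrBrantCode/unitest_baseline | mut_generate/mist_train_cf/cf_10301/solution.py | modify_list
-- ===== SOURCE A (Python) =====
-- def modify_list(strings, default_value):
--     """
--     Replaces empty strings in a list with a specified default value, removes duplicates,
--     and returns the modified list in alphabetical order.
--
--     Args:
--         strings (list): A list of strings.
--         default_value (str): The value to replace empty strings with.
--
--     Returns:
--         list: The modified list with no duplicates, sorted alphabetically.
--     """
--     modified_list = []
--     unique_strings = set()
--
--     for string in strings:
--         if string == "":
--             modified_list.append(default_value)
--         else:
--             unique_strings.add(string)
--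
--     modified_list.extend(sorted(list(unique_strings)))
--
--     return modified_list
-- ===== SOURCE B (Python) =====
-- def _merge_unique(a, b):
--     """Merge two sorted duplicate-free lists into one, dropping duplicates as they meet."""
--     res = []
--     i = j = 0
--     while i < len(a) and j < len(b):
--         if a[i] < b[j]:
--             res.append(a[i]); i += 1
--         elif b[j] < a[i]:
--             res.append(b[j]); j += 1
--         else:
--             res.append(a[i]); i += 1; j += 1
--     res.extend(a[i:])
--     res.extend(b[j:])
--     return res
--
--
-- def _msort_unique(l):
--     """Mergesort that eliminates duplicates while merging."""
--     if len(l) <= 1: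
--         return l
--     mid = len(l) // 2
--     return _merge_unique(_msort_unique(l[:mid]), _msort_unique(l[mid:]))
--
--
-- def modify_list(strings, default_value):
--     return [default_value] * strings.count("") + _msort_unique([s for s in strings if s != ""])
-- ===== Notes on version B (the rewrite author's own statement) =====
-- stated objective: alternative
-- what changed: Replaces the single partition loop plus hash-set dedup plus library sort by staged passes (count('') and a comprehension) and a hand-written divide-and-conquer mergesort whose merge step eliminates duplicates as the two halves are merged, so no set and no sort call exist.
import Mathlib
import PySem

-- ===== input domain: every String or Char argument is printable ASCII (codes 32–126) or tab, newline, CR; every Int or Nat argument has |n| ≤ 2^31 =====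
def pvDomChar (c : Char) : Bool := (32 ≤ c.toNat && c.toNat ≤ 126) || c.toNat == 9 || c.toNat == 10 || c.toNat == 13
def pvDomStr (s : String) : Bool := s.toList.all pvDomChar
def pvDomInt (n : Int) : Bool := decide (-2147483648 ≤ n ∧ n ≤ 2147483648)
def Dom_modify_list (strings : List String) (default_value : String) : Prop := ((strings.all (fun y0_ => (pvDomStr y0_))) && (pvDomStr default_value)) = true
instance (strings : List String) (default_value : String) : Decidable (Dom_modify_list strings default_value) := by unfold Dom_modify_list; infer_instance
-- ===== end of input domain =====

-- B replaces A's partition loop + hash set + library sort by staged passes (count/filter) and a hand-written mergesort that drops duplicates during the merge; alternative structure, same results.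

-- ===== PORT A =====
def modify_list (strings : List String) (default_value : String) : List String :=
  let st := strings.foldl
    (fun (acc : List String × PySem.Set String) s =>
      if s == "" then (acc.1 ++ [default_value], acc.2)
      else (acc.1, PySem.Set.add acc.2 s))
    ([], PySem.Set.empty)
  st.1 ++ PySem.List.sorted st.2 (fun x => x) false

-- ===== PORT B =====
-- _merge_unique: the two-pointer merge loop, as structural recursion on the same comparisons
def pvMergeU : List String → List String → List String
  | [], b => b
  | a, [] => a
  | x :: a, y :: b =>
      if x < y then x :: pvMergeU a (y :: b)
      else if y < x then y :: pvMergeU (x :: a) b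
      else x :: pvMergeU a b

-- _msort_unique: l[:mid] / l[mid:] are List.take / List.drop (exact: mid = len//2 is in range)
def pvMSU (l : List String) : List String :=
  if l.length ≤ 1 then l
  else pvMergeU (pvMSU (l.take (l.length / 2))) (pvMSU (l.drop (l.length / 2)))
termination_by l.length
decreasing_by
  · simp; omega
  · simp; omega

def modify_list_alt (strings : List String) (default_value : String) : List String :=
  List.replicate (PySem.List.count strings "") default_value
    ++ pvMSU (strings.filter (fun s => !(s == "")))

-- ===== PRECONDITION & SPEC =====
def Spec_modify_list (strings : List String) (default_value : String) (out : List String) : Prop := out = modify_list_alt strings default_value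
instance (strings : List String) (default_value : String) (out : List String) : Decidable (Spec_modify_list strings default_value out) := by unfold Spec_modify_list; infer_instance

-- ===== CLAIM =====
def Claim_equal_modify_list : Prop := ∀ (strings : List String) (default_value : String), Dom_modify_list strings default_value → Spec_modify_list strings default_value (modify_list strings default_value)

-- ===== LEMMAS AND PROOFS =====

-- characterization of A's pass: empties replaced, non-empties into the set
lemma pvFoldA_char (l : List String) (dv : String) : ∀ (r : List String) (s : PySem.Set String),
    l.foldl (fun (acc : List String × PySem.Set String) s =>
      if s == "" then (acc.1 ++ [dv], acc.2)
      else (acc.1, PySem.Set.add acc.2 s)) (r, s)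
    = (r ++ (l.filter (fun x => x == "")).map (fun _ => dv),
       (l.filter (fun x => !(x == ""))).foldl PySem.Set.add s) := by
  induction l with
  | nil => intro r s; simp
  | cons x xs ih =>
    intro r s
    rw [List.foldl_cons]
    by_cases h : x = ""
    · rw [if_pos (by simp [h])]; rw [ih]; simp [h]
    · rw [if_neg (by simp [h])]; rw [ih]; simp [h]

lemma pvMap_filter_eq_replicate (dv : String) : ∀ (l : List String),
    (l.filter (fun x => x == "")).map (fun _ => dv) = List.replicate (l.count "") dv := by
  intro l
  induction l with
  | nil => simp
  | cons x xs ih =>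
    by_cases h : x = ""
    · simp [h, ih, List.replicate_succ]
    · simp [h, ih, List.count_cons]

lemma pvMergeU_mem (a b : List String) (z : String) : z ∈ pvMergeU a b ↔ z ∈ a ∨ z ∈ b := by
  match a, b with
  | [], b => simp [pvMergeU]
  | x :: a, [] => simp [pvMergeU]
  | x :: a, y :: b =>
    by_cases h1 : x < y
    · simp only [pvMergeU, if_pos h1, List.mem_cons, pvMergeU_mem a (y :: b) z]
      tauto
    · by_cases h2 : y < x
      · simp only [pvMergeU, if_neg h1, if_pos h2, List.mem_cons, pvMergeU_mem (x :: a) b z]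
        tauto
      · simp only [pvMergeU, if_neg h1, if_neg h2, List.mem_cons, pvMergeU_mem a b z]
        have hxy : x = y := le_antisymm (le_of_not_gt h2) (le_of_not_gt h1)
        subst hxy
        tauto
termination_by a.length + b.length

lemma pvMergeU_pw (a b : List String) (ha : a.Pairwise (· < ·)) (hb : b.Pairwise (· < ·)) :
    (pvMergeU a b).Pairwise (· < ·) := by
  match a, b with
  | [], b => simpa [pvMergeU] using hb
  | x :: a, [] => simpa [pvMergeU] using ha
  | x :: a, y :: b =>
    have ha' := (List.pairwise_cons.mp ha).2
    have hxa := (List.pairwise_cons.mp ha).1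
    have hb' := (List.pairwise_cons.mp hb).2
    have hyb := (List.pairwise_cons.mp hb).1
    by_cases h1 : x < y
    · simp only [pvMergeU, if_pos h1]
      refine List.pairwise_cons.mpr ⟨?_, pvMergeU_pw a (y :: b) ha' hb⟩
      intro z hz
      rcases (pvMergeU_mem a (y :: b) z).mp hz with hz | hz
      · exact hxa z hz
      · rcases List.mem_cons.mp hz with rfl | hz'
        · exact h1
        · exact lt_trans h1 (hyb z hz')
    · by_cases h2 : y < x
      · simp only [pvMergeU, if_neg h1, if_pos h2]
        refine List.pairwise_cons.mpr ⟨?_, pvMergeU_pw (x :: a) b ha hb'⟩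
        intro z hz
        rcases (pvMergeU_mem (x :: a) b z).mp hz with hz | hz
        · rcases List.mem_cons.mp hz with rfl | hz'
          · exact h2
          · exact lt_trans h2 (hxa z hz')
        · exact hyb z hz
      · have hxy : x = y := le_antisymm (le_of_not_gt h2) (le_of_not_gt h1)
        subst hxy
        simp only [pvMergeU, if_neg h1, if_neg h2]
        refine List.pairwise_cons.mpr ⟨?_, pvMergeU_pw a b ha' hb'⟩
        intro z hz
        rcases (pvMergeU_mem a b z).mp hz with hz | hz
        · exact hxa z hz
        · exact hyb z hz
termination_by a.length + b.length

lemma pvMSU_props (l : List String) :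
    (pvMSU l).Pairwise (· < ·) ∧ ∀ z, z ∈ pvMSU l ↔ z ∈ l := by
  by_cases h : l.length ≤ 1
  · rw [pvMSU, if_pos h]
    match l, h with
    | [], _ => simp
    | [x], _ => simp
  · rw [pvMSU, if_neg h]
    have hl1 : (l.take (l.length / 2)).length < l.length := by simp; omega
    have hl2 : (l.drop (l.length / 2)).length < l.length := by simp; omega
    have p1 := pvMSU_props (l.take (l.length / 2))
    have p2 := pvMSU_props (l.drop (l.length / 2))
    constructor
    · exact pvMergeU_pw _ _ p1.1 p2.1
    · intro z
      rw [pvMergeU_mem, p1.2 z, p2.2 z]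
      constructor
      · rintro (hz | hz)
        · exact List.mem_of_mem_take hz
        · exact List.mem_of_mem_drop hz
      · intro hz
        rw [← List.take_append_drop (l.length / 2) l] at hz
        exact List.mem_append.mp hz
termination_by l.length
decreasing_by
  · simpa using hl1
  · simpa using hl2

lemma pvSorted_set_eq_msu (F : List String) :
    PySem.List.sorted (PySem.Set.ofList F) (fun x => x) false = pvMSU F := by
  have hp := pvMSU_props F
  apply PySem.List.sorted_eq_of_perm_of_pairwise_lt
  · have hnd1 : (pvMSU F).Nodup := hp.1.imp (fun h => ne_of_lt h)
    have hnd2 : (PySem.Set.ofList F).Nodup := PySem.Set.nodup_ofList F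
    rw [List.perm_ext_iff_of_nodup hnd1 hnd2]
    intro y
    rw [hp.2 y, PySem.Set.mem_ofList]
  · exact hp.1

-- ===== VERDICT =====
theorem modify_list_spec : Claim_equal_modify_list := by
  intro strings dv _
  unfold Spec_modify_list modify_list modify_list_alt
  rw [pvFoldA_char]
  simp only [List.nil_append]
  have h1 : List.foldl PySem.Set.add PySem.Set.empty (strings.filter (fun x => !(x == "")))
      = PySem.Set.ofList (strings.filter (fun x => !(x == ""))) := rfl
  rw [h1, pvSorted_set_eq_msu, pvMap_filter_eq_replicate, PySem.List.count_eq]
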